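-- pv_equiv track=rewrite | github.com/AliceInWonderland61/spring2025-python | Week3/week-3-S2-P2.py | terrain_elevation_match
-- ===== SOURCE A (Python) =====
-- def terrain_elevation_match(terrain):
--     #kinda confusing but we're using numbers 0 to n where n is the lenght of the terrain
--     n=len(terrain)
--     smallest=0
--     largest=n
--     new_terrain=[]
--     for i in range(n):
--         if terrain[i]=='I':
--             new_terrain.append(smallest)
--             smallest+=1
--         else:
--             new_terrain.append(largest)
--             largest-=1
--     new_terrain.append(smallest) #we can append either smallest or largest since they will be the same at this point
--     return new_terrain
-- ===== SOURCE B (Python) =====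
-- def terrain_elevation_match(terrain):
--     n = len(terrain)
--     pref = [0] * (n + 1)                      # pref[i] = number of 'I' in terrain[0:i]
--     for i, ch in enumerate(terrain):
--         pref[i + 1] = pref[i] + (ch == 'I')
--     out = [p if ch == 'I' else n - (i - p)
--            for i, (ch, p) in enumerate(zip(terrain, pref))]
--     out.append(pref[n])
--     return out
-- ===== Notes on version B (the rewrite author's own statement) =====
-- stated objective: alternative
-- what changed: Replaces A's single loop threading two mutable counters (smallest/largest) with two passes: a prefix table of 'I'-counts, then an index-to-value closed-form map (pref[i] for 'I', n-(i-pref[i]) otherwise) with the total 'I'-count appended.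
import Mathlib
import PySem

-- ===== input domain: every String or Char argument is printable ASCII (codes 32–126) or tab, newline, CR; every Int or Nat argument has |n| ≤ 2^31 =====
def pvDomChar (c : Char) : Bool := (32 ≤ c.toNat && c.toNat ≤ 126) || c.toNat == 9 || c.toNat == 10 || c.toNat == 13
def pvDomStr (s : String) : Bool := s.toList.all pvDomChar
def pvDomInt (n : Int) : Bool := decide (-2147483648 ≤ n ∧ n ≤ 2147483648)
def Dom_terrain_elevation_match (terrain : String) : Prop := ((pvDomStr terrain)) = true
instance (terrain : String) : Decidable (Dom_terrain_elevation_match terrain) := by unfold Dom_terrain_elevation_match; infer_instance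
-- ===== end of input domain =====

-- B replaces A's counter-threading loop with a prefix 'I'-count table plus a closed-form map (alternative decomposition, same cost).


-- ===== PORT A =====
-- A's loop over the characters, threading smallest/largest and the accumulator.
def pvAGo : List Char → Int → Int → List Int → List Int
  | [], smallest, _, acc => acc ++ [smallest]
  | c :: r, smallest, largest, acc =>
      if c = 'I' then pvAGo r (smallest + 1) largest (acc ++ [smallest])
      else pvAGo r smallest (largest - 1) (acc ++ [largest])

def terrain_elevation_match (terrain : String) : List Int :=
  pvAGo terrain.toList 0 (terrain.toList.length : Int) []

-- ===== PORT B =====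
-- pvPref cs a = [a, a + #I in cs[0:1], …, a + #I in cs]  (length |cs|+1): B's prefix table.
def pvPref : List Char → Int → List Int
  | [], a => [a]
  | c :: r, a => a :: pvPref r (a + (if c = 'I' then 1 else 0))

def terrain_elevation_match_alt (terrain : String) : List Int :=
  let cs := terrain.toList
  let n : Int := cs.length
  let pref := pvPref cs 0
  let out := (PySem.List.enumerate (cs.zip pref) 0).map
      (fun q => if q.2.1 = 'I' then q.2.2 else n - (q.1 - q.2.2))
  out ++ [pref.getLastD 0]

-- ===== PRECONDITION & SPEC =====
def Spec_terrain_elevation_match (terrain : String) (out : List Int) : Prop := out = terrain_elevation_match_alt terrain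
instance (terrain : String) (out : List Int) : Decidable (Spec_terrain_elevation_match terrain out) := by unfold Spec_terrain_elevation_match; infer_instance

-- ===== CLAIM (what is proved, stated in full; the proofs are below) =====
def Claim_equal_terrain_elevation_match : Prop := ∀ (terrain : String), Dom_terrain_elevation_match terrain → Spec_terrain_elevation_match terrain (terrain_elevation_match terrain)

-- ===== LEMMAS AND PROOFS =====

lemma pvPref_getLastD_cons (cs : List Char) (a b : Int) :
    (pvPref cs a).getLast?.getD 0 = (b :: pvPref cs a).getLast?.getD 0 := by
  cases cs <;> simp [pvPref]

lemma pvAGo_eq (n : Int) :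
    ∀ (cs : List Char) (s k : Int) (acc : List Int),
      pvAGo cs s (n - (k - s)) acc
        = acc ++ ((PySem.List.enumerate (cs.zip (pvPref cs s)) k).map
            (fun q => if q.2.1 = 'I' then q.2.2 else n - (q.1 - q.2.2)))
          ++ [(pvPref cs s).getLastD 0] := by
  intro cs
  induction cs with
  | nil => intro s k acc; simp [pvAGo, pvPref]
  | cons c r ih =>
    intro s k acc
    by_cases hc : c = 'I'
    · have h1 : n - (k - s) = n - ((k + 1) - (s + 1)) := by ring_nf
      simp only [pvAGo, pvPref, hc, List.zip_cons_cons,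
        PySem.List.enumerate_cons, List.map_cons, h1]
      rw [ih (s + 1) (k + 1) (acc ++ [s])]
      simp [pvPref_getLastD_cons r (s+1) s]
    · have h1 : n - (k - s) - 1 = n - ((k + 1) - s) := by ring_nf
      simp only [pvAGo, pvPref, hc, List.zip_cons_cons,
        PySem.List.enumerate_cons, List.map_cons, h1]
      rw [ih s (k + 1) (acc ++ [n - (k - s)])]
      simp [pvPref_getLastD_cons r s s]

-- ===== VERDICT (by name: the statement is the Claim_ definition above) =====
theorem terrain_elevation_match_spec : Claim_equal_terrain_elevation_match := by
  intro terrain _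
  unfold Spec_terrain_elevation_match terrain_elevation_match terrain_elevation_match_alt
  have h := pvAGo_eq (terrain.toList.length : Int) terrain.toList 0 0 []
  simpa using h
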